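-- pv_equiv track=rewrite | github.com/nnkennard/mention_bottleneck | convert/create_alternate_conlls.py | create_additional_labels
-- ===== SOURCE A (Python) =====
-- def create_additional_labels(new_mentions, cluster_offset, doc_len):
--   labels = ["" for _ in range(doc_len)]
--   for i , (start, end) in enumerate(sorted(new_mentions)):
--     if labels[start]:
--       labels[start] += "|"
--     if start == end:
--       labels[start] += "(s" + str(i + cluster_offset) + ")"
--     else:
--       labels[start] += "(s"+ str(i + cluster_offset)
--       if labels[end]:
--         labels[end] += "|"
--       labels[end] +=  "s" + str(i + cluster_offset) + ")"
--   return labels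
-- ===== SOURCE B (Python) =====
-- def create_additional_labels(new_mentions, cluster_offset, doc_len):
--   events = []
--   for i, (start, end) in enumerate(sorted(new_mentions)):
--     sid = "s" + str(i + cluster_offset)
--     if start == end:
--       events.append((start, i, "(" + sid + ")"))
--     else:
--       events.append((start, i, "(" + sid))
--       events.append((end, i, sid + ")"))
--   events.sort(key=lambda e: (e[0], e[1]))
--   labels = []
--   k = 0
--   for p in range(doc_len):
--     frags = []
--     while k < len(events) and events[k][0] == p:
--       frags.append(events[k][2])
--       k += 1
--     labels.append("|".join(frags))
--   if k < len(events):
--     raise IndexError("mention position outside the document")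
--   return labels
-- ===== Notes on version B (the rewrite author's own statement) =====
-- stated objective: alternative
-- what changed: Instead of writing into a preallocated label array with manual '|'-separator bookkeeping, B emits (position, mention-index, fragment) events, sorts them, and merge-scans positions 0..doc_len-1 against the sorted event stream with a cursor, joining each position's fragments and rejecting unconsumed events.
-- outside the precondition, e.g. on create_additional_labels([(-1, -1)], 0, 2): A returns ['', '(s0)'], B raises IndexError; on create_additional_labels([(0, -1)], 0, 3): A returns ['(s0', '', 's0)'], B raises IndexError
import Mathlib
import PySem

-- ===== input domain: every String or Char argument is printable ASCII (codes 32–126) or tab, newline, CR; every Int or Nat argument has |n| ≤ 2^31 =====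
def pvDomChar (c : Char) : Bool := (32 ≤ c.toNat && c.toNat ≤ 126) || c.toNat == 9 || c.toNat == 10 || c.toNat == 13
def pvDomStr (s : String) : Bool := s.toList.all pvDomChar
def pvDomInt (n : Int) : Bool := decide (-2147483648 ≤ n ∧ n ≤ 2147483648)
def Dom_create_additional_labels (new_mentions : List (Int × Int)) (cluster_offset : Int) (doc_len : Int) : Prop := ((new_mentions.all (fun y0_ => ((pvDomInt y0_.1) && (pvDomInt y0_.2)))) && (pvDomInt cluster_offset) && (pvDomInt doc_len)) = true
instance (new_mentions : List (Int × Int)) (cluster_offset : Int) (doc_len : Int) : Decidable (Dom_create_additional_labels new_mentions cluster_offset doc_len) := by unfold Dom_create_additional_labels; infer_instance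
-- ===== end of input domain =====

-- B builds a (position, mention-index, fragment) event list, sorts it, and merge-scans the
-- positions against the sorted stream, instead of A's in-place indexed writes with manual
-- "|"-separator bookkeeping (objective: alternative, same asymptotic cost).

-- ===== PORT A =====
-- labels[i] += x  (index in range under Pre_; out of range Python raises, pySetD/pyGetD are no-ops there)
def pyStrApp (labels : List String) (i : Int) (x : String) : List String :=
  PySem.List.pySetD labels i (PySem.List.pyGetD labels i "" ++ x)

-- the body of A's `for i, (start, end) in enumerate(sorted(new_mentions))` loop
def aStep (cluster_offset : Int) (labels : List String) (ise : Int × Int × Int) : List String :=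
  let i := ise.1
  let start := ise.2.1
  let «end» := ise.2.2
  let labels := if PySem.List.pyGetD labels start "" ≠ "" then pyStrApp labels start "|" else labels
  if start = «end» then
    pyStrApp labels start ("(s" ++ PySem.Int.toStr (i + cluster_offset) ++ ")")
  else
    let labels := pyStrApp labels start ("(s" ++ PySem.Int.toStr (i + cluster_offset))
    let labels := if PySem.List.pyGetD labels «end» "" ≠ "" then pyStrApp labels «end» "|" else labels
    pyStrApp labels «end» ("s" ++ PySem.Int.toStr (i + cluster_offset) ++ ")")

def create_additional_labels (new_mentions : List (Int × Int)) (cluster_offset : Int) (doc_len : Int) : List String :=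
  let labels : List String := (PySem.List.pyRange 0 doc_len 1).map (fun _ => "")
  (PySem.List.enumerate (PySem.List.sorted2 new_mentions Prod.fst Prod.snd) 0).foldl
    (aStep cluster_offset) labels

-- ===== PORT B =====
-- the body of B's first loop: events.append(...) for one enumerated mention
def bEvStep (cluster_offset : Int) (events : List (Int × Int × String)) (ise : Int × Int × Int) : List (Int × Int × String) :=
  let sid := "s" ++ PySem.Int.toStr (ise.1 + cluster_offset)
  if ise.2.1 = ise.2.2 then events ++ [(ise.2.1, ise.1, "(" ++ sid ++ ")")]
  else events ++ [(ise.2.1, ise.1, "(" ++ sid), (ise.2.2, ise.1, sid ++ ")")]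

-- B's inner `while k < len(events) and events[k][0] == p` loop: the cursor is the remaining
-- suffix of the sorted event list; returns (collected fragments, remaining events)
def bCollect (p : Int) : List (Int × Int × String) → List String × List (Int × Int × String)
  | [] => ([], [])
  | e :: rest =>
    if e.1 = p then ((e.2.2 :: (bCollect p rest).1), (bCollect p rest).2)
    else ([], e :: rest)

-- Source B's trailing `if k < len(events): raise IndexError` fires only outside Pre_ (an event at a
-- position the scan never visits); the total port returns the scanned labels there instead.
def create_additional_labels_alt (new_mentions : List (Int × Int)) (cluster_offset : Int) (doc_len : Int) : List String :=
  let events := (PySem.List.enumerate (PySem.List.sorted2 new_mentions Prod.fst Prod.snd) 0).foldl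
    (bEvStep cluster_offset) []
  let sortedE := PySem.List.sorted2 events (fun e => e.1) (fun e => e.2.1)
  ((PySem.List.pyRange 0 doc_len 1).foldl
    (fun st p => ((st.1 ++ [PySem.Str.join "|" (bCollect p st.2).1]), (bCollect p st.2).2))
    (([] : List String), sortedE)).1

-- ===== PRECONDITION & SPEC =====
-- Pre_ is the task's natural domain: every mention coordinate a document position in [0, doc_len).
-- Outside it A raises IndexError (coordinate < -doc_len or >= doc_len) or, on negative in-range
-- coordinates, returns a value produced by Python's negative-index wraparound — a corner outside
-- the natural domain of document positions, on which B itself raises (see claim.json "cites").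
def Pre_create_additional_labels (new_mentions : List (Int × Int)) (cluster_offset : Int) (doc_len : Int) : Prop :=
  ∀ m ∈ new_mentions, 0 ≤ m.1 ∧ m.1 < doc_len ∧ 0 ≤ m.2 ∧ m.2 < doc_len
instance (new_mentions : List (Int × Int)) (cluster_offset : Int) (doc_len : Int) : Decidable (Pre_create_additional_labels new_mentions cluster_offset doc_len) := by unfold Pre_create_additional_labels; infer_instance
def pvWitness_create_additional_labels : (List (Int × Int)) × Int × Int := ([(0, 1), (2, 2), (0, 2)], 1, 3)

def Spec_create_additional_labels (new_mentions : List (Int × Int)) (cluster_offset : Int) (doc_len : Int) (out : List String) : Prop := out = create_additional_labels_alt new_mentions cluster_offset doc_len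
instance (new_mentions : List (Int × Int)) (cluster_offset : Int) (doc_len : Int) (out : List String) : Decidable (Spec_create_additional_labels new_mentions cluster_offset doc_len out) := by unfold Spec_create_additional_labels; infer_instance

-- ===== CLAIM (what is proved, stated in full; the proofs are below) =====
def Claim_equal_create_additional_labels : Prop := ∀ (new_mentions : List (Int × Int)) (cluster_offset : Int) (doc_len : Int), Dom_create_additional_labels new_mentions cluster_offset doc_len → Pre_create_additional_labels new_mentions cluster_offset doc_len → Spec_create_additional_labels new_mentions cluster_offset doc_len (create_additional_labels new_mentions cluster_offset doc_len)

-- ===== LEMMAS AND PROOFS =====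

-- proof-layer intermediate: per-position fragment lists (A's labels are their "|"-joins)
def pyListAppendAt (frags : List (List String)) (i : Int) (x : String) : List (List String) :=
  PySem.List.pySetD frags i (PySem.List.pyGetD frags i [] ++ [x])

def pvFragStep (cluster_offset : Int) (frags : List (List String)) (ise : Int × Int × Int) : List (List String) :=
  let sid := "s" ++ PySem.Int.toStr (ise.1 + cluster_offset)
  if ise.2.1 = ise.2.2 then
    pyListAppendAt frags ise.2.1 ("(" ++ sid ++ ")")
  else
    pyListAppendAt (pyListAppendAt frags ise.2.1 ("(" ++ sid)) ise.2.2 (sid ++ ")")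

-- the events one enumerated mention contributes
def pvEvs (cluster_offset : Int) (x : Int × Int × Int) : List (Int × Int × String) :=
  let sid := "s" ++ PySem.Int.toStr (x.1 + cluster_offset)
  if x.2.1 = x.2.2 then [(x.2.1, x.1, "(" ++ sid ++ ")")]
  else [(x.2.1, x.1, "(" ++ sid), (x.2.2, x.1, sid ++ ")")]

def pvJ (f : List String) : String := PySem.Str.join "|" f

lemma pvIdx_lt {n : Nat} {i : Int} {k : Nat} (h : PySem.List.pyIdx? n i = some k) : k < n := by
  unfold PySem.List.pyIdx? at h
  split_ifs at h with h1 h2 h3 <;> simp_all <;> omega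

lemma pvJoin_snoc (sep : List Char) (l : List (List Char)) (x : List Char) :
    PySem.Chars.join sep (l ++ [x]) =
      if l = [] then x else PySem.Chars.join sep l ++ sep ++ x := by
  induction l with
  | nil => rw [List.nil_append, PySem.Chars.join_singleton, if_pos rfl]
  | cons a t ih =>
    cases t with
    | nil =>
      rw [List.singleton_append, PySem.Chars.join_cons_cons, PySem.Chars.join_singleton,
        PySem.Chars.join_singleton, if_neg (by simp)]
    | cons b t' =>
      rw [show (a :: b :: t') ++ [x] = a :: (b :: (t' ++ [x])) from rfl,
        PySem.Chars.join_cons_cons,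
        show b :: (t' ++ [x]) = (b :: t') ++ [x] from rfl, ih,
        if_neg (by simp), if_neg (by simp), PySem.Chars.join_cons_cons]
      simp [List.append_assoc]

lemma pvJoin_ne_nil (sep : List Char) (l : List (List Char)) (hl : l ≠ [])
    (hne : ∀ c ∈ l, c ≠ []) : PySem.Chars.join sep l ≠ [] := by
  cases l with
  | nil => exact absurd rfl hl
  | cons a t =>
    cases t with
    | nil => simpa [PySem.Chars.join_singleton] using hne a (by simp)
    | cons b t' =>
      rw [PySem.Chars.join_cons_cons]
      have := hne a (by simp)
      simp [this]

lemma pvStr_eq_of_toList {s t : String} (h : s.toList = t.toList) : s = t :=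
  String.toList_inj.mp h

lemma pvJ_nil : pvJ [] = "" := by
  apply pvStr_eq_of_toList
  simp [pvJ, PySem.Str.toList_join, PySem.Chars.join_nil]

lemma pvJ_eq_empty_iff (f : List String) (hne : ∀ s ∈ f, s ≠ "") : pvJ f = "" ↔ f = [] := by
  constructor
  · intro h
    by_contra hf
    have h1 : (pvJ f).toList = [] := by rw [h]; rfl
    rw [pvJ, PySem.Str.toList_join] at h1
    refine pvJoin_ne_nil _ _ (by simpa using hf) ?_ h1
    intro c hc
    simp only [List.mem_map] at hc
    obtain ⟨s, hs, rfl⟩ := hc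
    simpa [String.toList_eq_nil_iff] using hne s hs
  · rintro rfl; exact pvJ_nil

lemma pvStrApp_join (f : List String) (x : String) (hne : ∀ s ∈ f, s ≠ "") :
    (if pvJ f ≠ "" then pvJ f ++ "|" else pvJ f) ++ x = pvJ (f ++ [x]) := by
  by_cases hf : f = []
  · subst hf
    rw [if_neg (by simp [pvJ_nil]), pvJ_nil]
    apply pvStr_eq_of_toList
    simp [pvJ, PySem.Str.toList_join, PySem.Chars.join_singleton]
  · have hJ : pvJ f ≠ "" := fun h => hf ((pvJ_eq_empty_iff f hne).mp h)
    rw [if_pos hJ]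
    apply pvStr_eq_of_toList
    simp only [String.toList_append, pvJ, PySem.Str.toList_join, List.map_append,
      List.map_singleton, pvJoin_snoc, if_neg (show f.map String.toList ≠ [] by simpa using hf)]

-- a single `labels[i] += sep?/x` on the string side matches a single append on the fragment side
lemma pvApp_rel (frags : List (List String)) (i : Int) (x : String) (hx : x ≠ "")
    (hne : ∀ f ∈ frags, ∀ s ∈ f, s ≠ "") :
    (pyStrApp (if PySem.List.pyGetD (frags.map pvJ) i "" ≠ "" then
        pyStrApp (frags.map pvJ) i "|" else frags.map pvJ) i x)
      = (pyListAppendAt frags i x).map pvJ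
    ∧ ∀ f ∈ pyListAppendAt frags i x, ∀ s ∈ f, s ≠ "" := by
  cases h : PySem.List.pyIdx? frags.length i with
  | none =>
    have hL : (frags.map pvJ).length = frags.length := List.length_map ..
    have hget : PySem.List.pyGetD (frags.map pvJ) i "" = "" := by
      simp [PySem.List.pyGetD, PySem.List.pyGet?, hL, h]
    have hsetL : ∀ (v : String), PySem.List.pySetD (frags.map pvJ) i v = frags.map pvJ := by
      intro v; simp [PySem.List.pySetD, PySem.List.pySet?, hL, h]
    have hsetF : pyListAppendAt frags i x = frags := by
      simp [pyListAppendAt, PySem.List.pySetD, PySem.List.pySet?, h]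
    rw [hsetF]
    refine ⟨?_, hne⟩
    simp [hget, pyStrApp, hsetL]
  | some k =>
    have hk : k < frags.length := pvIdx_lt h
    have hL : (frags.map pvJ).length = frags.length := List.length_map ..
    have hget : PySem.List.pyGetD (frags.map pvJ) i "" = pvJ frags[k] := by
      simp [PySem.List.pyGetD, PySem.List.pyGet?, hL, h, hk]
    have hset : ∀ (v : String), PySem.List.pySetD (frags.map pvJ) i v = (frags.map pvJ).set k v := by
      intro v; simp [PySem.List.pySetD, PySem.List.pySet?, hL, h]
    have hkf : ∀ s ∈ frags[k], s ≠ "" := hne _ (List.getElem_mem hk)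
    have happF : pyListAppendAt frags i x = frags.set k (frags[k] ++ [x]) := by
      simp [pyListAppendAt, PySem.List.pySetD, PySem.List.pySet?, PySem.List.pyGetD,
        PySem.List.pyGet?, h, hk]
    constructor
    · by_cases hc : pvJ frags[k] = ""
      · rw [happF, List.map_set]
        have : (if PySem.List.pyGetD (frags.map pvJ) i "" ≠ "" then
            pyStrApp (frags.map pvJ) i "|" else frags.map pvJ) = frags.map pvJ := by
          simp [hget, hc]
        rw [this, pyStrApp, hget, hset]
        congr 1
        rw [← pvStrApp_join frags[k] x hkf]
        simp [hc]
      · have hcond : (if PySem.List.pyGetD (frags.map pvJ) i "" ≠ "" then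
            pyStrApp (frags.map pvJ) i "|" else frags.map pvJ)
            = (frags.map pvJ).set k (pvJ frags[k] ++ "|") := by
          rw [if_pos (by simpa [hget] using hc), pyStrApp, hget, hset]
        rw [hcond, happF, List.map_set]
        have hL' : ((frags.map pvJ).set k (pvJ frags[k] ++ "|")).length = frags.length := by
          simp
        have hget' : PySem.List.pyGetD ((frags.map pvJ).set k (pvJ frags[k] ++ "|")) i ""
            = pvJ frags[k] ++ "|" := by
          simp [PySem.List.pyGetD, PySem.List.pyGet?, hL', h, hk]
        have hset' : PySem.List.pySetD ((frags.map pvJ).set k (pvJ frags[k] ++ "|")) i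
            (pvJ frags[k] ++ "|" ++ x)
            = (frags.map pvJ).set k (pvJ frags[k] ++ "|" ++ x) := by
          simp [PySem.List.pySetD, PySem.List.pySet?, hL', h, List.set_set]
        rw [pyStrApp, hget', hset']
        congr 1
        rw [← pvStrApp_join frags[k] x hkf]
        simp [hc]
    · intro f hf s hs
      rw [happF] at hf
      rcases List.mem_or_eq_of_mem_set hf with hf | rfl
      · exact hne f hf s hs
      · rcases List.mem_append.1 hs with hs | hs
        · exact hkf s hs
        · simp only [List.mem_singleton] at hs; subst hs; exact hx

lemma pvNe_paren (t : String) : ("(s" ++ t : String) ≠ "" := by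
  intro h; rw [String.append_eq_empty_iff] at h; exact absurd h.1 (by decide)

lemma pvNe_close (t : String) : ("s" ++ t ++ ")" : String) ≠ "" := by
  intro h; rw [String.append_eq_empty_iff] at h; exact absurd h.2 (by decide)

lemma pvStep_rel (off : Int) (frags : List (List String)) (ise : Int × Int × Int)
    (hne : ∀ f ∈ frags, ∀ s ∈ f, s ≠ "") :
    aStep off (frags.map pvJ) ise = (pvFragStep off frags ise).map pvJ
    ∧ ∀ f ∈ pvFragStep off frags ise, ∀ s ∈ f, s ≠ "" := by
  obtain ⟨i, s, e⟩ := ise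
  by_cases hse : s = e
  · have hx : ("(s" ++ PySem.Int.toStr (i + off) ++ ")" : String) ≠ "" := by
      intro h; rw [String.append_eq_empty_iff] at h; exact absurd h.1 (pvNe_paren _)
    have h := pvApp_rel frags s ("(s" ++ PySem.Int.toStr (i + off) ++ ")") hx hne
    have heq : ("(" ++ ("s" ++ PySem.Int.toStr (i + off)) ++ ")" : String)
        = "(s" ++ PySem.Int.toStr (i + off) ++ ")" := by
      rw [← String.append_assoc]; rfl
    constructor
    · simpa [aStep, pvFragStep, hse, heq] using h.1
    · simpa [pvFragStep, hse, heq] using h.2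
  · have h1 := pvApp_rel frags s ("(s" ++ PySem.Int.toStr (i + off)) (pvNe_paren _) hne
    have h2 := pvApp_rel (pyListAppendAt frags s ("(s" ++ PySem.Int.toStr (i + off))) e
      ("s" ++ PySem.Int.toStr (i + off) ++ ")") (pvNe_close _) h1.2
    have heq1 : ("(" ++ ("s" ++ PySem.Int.toStr (i + off)) : String)
        = "(s" ++ PySem.Int.toStr (i + off) := by rw [← String.append_assoc]; rfl
    have heq2 : (("s" ++ PySem.Int.toStr (i + off)) ++ ")" : String)
        = "s" ++ PySem.Int.toStr (i + off) ++ ")" := rfl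
    constructor
    · simp only [aStep, pvFragStep, hse, ite_false, heq1]
      rw [← h1.1] at h2
      simpa using h2.1
    · simpa [pvFragStep, hse, heq1, heq2] using h2.2

lemma pvFold_rel (off : Int) (L : List (Int × Int × Int)) :
    ∀ (frags : List (List String)), (∀ f ∈ frags, ∀ s ∈ f, s ≠ "") →
    L.foldl (aStep off) (frags.map pvJ) = (L.foldl (pvFragStep off) frags).map pvJ
    ∧ ∀ f ∈ L.foldl (pvFragStep off) frags, ∀ s ∈ f, s ≠ "" := by
  induction L with
  | nil => intro frags hne; exact ⟨rfl, hne⟩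
  | cons p L ih =>
    intro frags hne
    have h := pvStep_rel off frags p hne
    simp only [List.foldl_cons, h.1]
    exact ih _ h.2

-- ---------- frag-fold characterisation (A side, under Pre_) ----------

lemma pvRange_eq (d : Int) :
    PySem.List.pyRange 0 d 1 = (List.range d.toNat).map (fun k : Nat => (k : Int)) := by
  rcases (by omega : d ≤ 0 ∨ 0 < d) with hd | hd
  · have h1 : PySem.List.pyRange 0 d 1 = [] := by
      rw [List.eq_nil_iff_forall_not_mem]
      intro x hx
      rw [PySem.List.mem_pyRange_one] at hx
      omega
    rw [h1, Int.toNat_of_nonpos hd]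
    simp
  · conv_lhs => rw [show d = ((d.toNat : Nat) : Int) by omega]
    exact PySem.List.pyRange_zero_natCast _

lemma pvAppendAt_map (d : Int) (h : Int → List String) (s : Int) (x : String)
    (h0 : 0 ≤ s) (h1 : s < d) :
    pyListAppendAt ((PySem.List.pyRange 0 d 1).map h) s x
      = (PySem.List.pyRange 0 d 1).map (fun p => if p = s then h p ++ [x] else h p) := by
  unfold pyListAppendAt
  rw [show PySem.List.pyGetD ((PySem.List.pyRange 0 d 1).map h) s [] = h s from
    PySem.List.pyGetD_map_pyRange_of_nonneg h d s [] h0 h1]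
  rw [PySem.List.pySetD_of_nonneg _ _ h0]
  rw [pvRange_eq]
  apply List.ext_getElem
  · simp
  · intro j hj1 hj2
    simp only [List.length_set, List.length_map, List.length_range] at hj1
    rw [List.getElem_set]
    simp only [List.getElem_map, List.getElem_range]
    by_cases hjs : s.toNat = j
    · rw [if_pos hjs, if_pos (show ((j : Nat) : Int) = s by omega)]
      have hj' : ((j : Nat) : Int) = s := by omega
      rw [hj']
    · rw [if_neg hjs, if_neg (show ¬ ((j : Nat) : Int) = s by omega)]

lemma pvFragsFold (off d : Int) :
    ∀ (L : List (Int × Int × Int)) (h : Int → List String),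
    (∀ x ∈ L, 0 ≤ x.2.1 ∧ x.2.1 < d ∧ 0 ≤ x.2.2 ∧ x.2.2 < d) →
    L.foldl (pvFragStep off) ((PySem.List.pyRange 0 d 1).map h)
      = (PySem.List.pyRange 0 d 1).map
          (fun p => h p ++ ((L.flatMap (pvEvs off)).filter (fun q => decide (q.1 = p))).map (fun q => q.2.2)) := by
  intro L
  induction L with
  | nil => intro h _; simp
  | cons x L ih =>
    intro h hb
    obtain ⟨i, s, e⟩ := x
    have hbx := hb (i, s, e) (by simp)
    simp only [List.foldl_cons]
    by_cases hse : s = e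
    · rw [show pvFragStep off ((PySem.List.pyRange 0 d 1).map h) (i, s, e)
          = pyListAppendAt ((PySem.List.pyRange 0 d 1).map h) s
              ("(" ++ ("s" ++ PySem.Int.toStr (i + off)) ++ ")") by
        simp [pvFragStep, hse]]
      rw [pvAppendAt_map d h s _ hbx.1 hbx.2.1]
      rw [ih _ (fun y hy => hb y (by simp [hy]))]
      apply List.map_congr_left
      intro p _
      simp only [List.flatMap_cons, List.filter_append, List.map_append, pvEvs, hse]
      by_cases hp : p = e
      · subst hp
        simp [List.filter, List.append_assoc]
      · have hep : ¬ (e = p) := Ne.symm hp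
        simp [List.filter, hp, hep]
    · rw [show pvFragStep off ((PySem.List.pyRange 0 d 1).map h) (i, s, e)
          = pyListAppendAt (pyListAppendAt ((PySem.List.pyRange 0 d 1).map h) s
              ("(" ++ ("s" ++ PySem.Int.toStr (i + off)))) e
              (("s" ++ PySem.Int.toStr (i + off)) ++ ")") by
        simp [pvFragStep, hse]]
      rw [pvAppendAt_map d h s _ hbx.1 hbx.2.1]
      rw [pvAppendAt_map d _ e _ hbx.2.2.1 hbx.2.2.2]
      rw [ih _ (fun y hy => hb y (by simp [hy]))]
      apply List.map_congr_left
      intro p _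
      simp only [List.flatMap_cons, List.filter_append, List.map_append, pvEvs, if_neg hse]
      by_cases hps : p = s
      · subst hps
        have hes : ¬ (e = p) := Ne.symm hse
        simp [List.filter, hse, hes, List.append_assoc]
      · by_cases hpe : p = e
        · subst hpe
          have hes : ¬ (p = s) := hps
          simp [List.filter, hps, Ne.symm hps, List.append_assoc]
        · simp [List.filter, hps, hpe, Ne.symm hps, Ne.symm hpe]

-- ---------- sorted events = position buckets (B side) ----------

lemma pvSorted2_eq_lex {α : Type} (xs : List α) (k1 k2 : α → Int) :
    PySem.List.sorted2 xs k1 k2 = PySem.List.sorted xs (fun x => toLex (k1 x, k2 x)) := by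
  have hcmp : ∀ a b : α, (decide (k1 a < k1 b) || (!decide (k1 b < k1 a) && decide (k2 a < k2 b)))
      = decide (toLex (k1 a, k2 a) < toLex (k1 b, k2 b)) := by
    intro a b
    by_cases h1 : k1 a < k1 b
    · simp [h1, Prod.Lex.lt_iff]
    · by_cases h2 : k1 b < k1 a
      · have hne : ¬ (k1 a = k1 b) := by omega
        simp [h1, h2, hne, Prod.Lex.lt_iff]
      · have he : k1 a = k1 b := by omega
        simp [he, Prod.Lex.lt_iff]
  show List.foldl (fun acc x => PySem.List.insertBy
      (fun a b => decide (k1 a < k1 b) || (!decide (k1 b < k1 a) && decide (k2 a < k2 b))) x acc) [] xs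
    = List.foldl (fun acc x => PySem.List.insertBy
      (fun a b => decide (toLex (k1 a, k2 a) < toLex (k1 b, k2 b))) x acc) [] xs
  simp only [hcmp]

lemma pvBucket_cons (q : Int × Int × String) (E' : List (Int × Int × String)) :
    ∀ (ps : List Int), ps.Pairwise (· ≠ ·) → q.1 ∈ ps →
    (ps.flatMap (fun p => (q :: E').filter (fun r => decide (r.1 = p)))).Perm
      (q :: ps.flatMap (fun p => E'.filter (fun r => decide (r.1 = p)))) := by
  intro ps
  induction ps with
  | nil => intro _ hq; simp at hq
  | cons p ps' ih =>
    intro hpw hq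
    have hpw' := List.pairwise_cons.1 hpw
    by_cases hqp : q.1 = p
    · have htail : ps'.flatMap (fun p => (q :: E').filter (fun r => decide (r.1 = p)))
          = ps'.flatMap (fun p => E'.filter (fun r => decide (r.1 = p))) := by
        apply List.flatMap_congr  -- congruence over members
        intro p' hp'
        have : ¬ (q.1 = p') := by
          intro hh; exact hpw'.1 p' hp' (hqp ▸ hh)
        simp [List.filter, this]
      simp only [List.flatMap_cons, htail]
      rw [show (q :: E').filter (fun r => decide (r.1 = p)) = q :: E'.filter (fun r => decide (r.1 = p)) by
        simp [List.filter, hqp]]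
      simp
    · have hq' : q.1 ∈ ps' := by
        rcases List.mem_cons.1 hq with h | h
        · exact absurd h hqp
        · exact h
      have hhead : (q :: E').filter (fun r => decide (r.1 = p)) = E'.filter (fun r => decide (r.1 = p)) := by
        simp [List.filter, hqp]
      simp only [List.flatMap_cons, hhead]
      exact (List.Perm.append_left _ (ih hpw'.2 hq')).trans List.perm_middle

lemma pvBuckets_perm (ps : List Int) (hpw : ps.Pairwise (· ≠ ·)) :
    ∀ (E : List (Int × Int × String)), (∀ q ∈ E, q.1 ∈ ps) →
    (ps.flatMap (fun p => E.filter (fun r => decide (r.1 = p)))).Perm E := by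
  intro E
  induction E with
  | nil => intro _; simp
  | cons q E' ih =>
    intro hmem
    exact (pvBucket_cons q E' ps hpw (hmem q (by simp))).trans
      ((ih (fun r hr => hmem r (by simp [hr]))).cons q)

-- ---------- event-stream pairwise facts ----------

def pvR (a b : Int × Int × String) : Prop := a.2.1 < b.2.1 ∨ a.1 ≠ b.1

lemma pvEvs_snd (off : Int) (x : Int × Int × Int) : ∀ q ∈ pvEvs off x, q.2.1 = x.1 := by
  intro q hq
  simp only [pvEvs] at hq
  by_cases hx : x.2.1 = x.2.2
  · rw [if_pos hx, List.mem_singleton] at hq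
    subst hq; rfl
  · rw [if_neg hx] at hq
    rcases List.mem_cons.1 hq with hq | hq
    · subst hq; rfl
    · rw [List.mem_singleton] at hq; subst hq; rfl

lemma pvEvs_fst (off : Int) (x : Int × Int × Int) :
    ∀ q ∈ pvEvs off x, q.1 = x.2.1 ∨ q.1 = x.2.2 := by
  intro q hq
  simp only [pvEvs] at hq
  by_cases hx : x.2.1 = x.2.2
  · rw [if_pos hx, List.mem_singleton] at hq
    subst hq; exact Or.inl rfl
  · rw [if_neg hx] at hq
    rcases List.mem_cons.1 hq with hq | hq
    · subst hq; exact Or.inl rfl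
    · rw [List.mem_singleton] at hq; subst hq; exact Or.inr rfl

lemma pvEvs_pairwise (off : Int) (x : Int × Int × Int) : (pvEvs off x).Pairwise pvR := by
  simp only [pvEvs]
  by_cases hx : x.2.1 = x.2.2
  · rw [if_pos hx]
    exact List.pairwise_singleton _ _
  · rw [if_neg hx]
    refine List.pairwise_cons.2 ⟨?_, List.pairwise_singleton _ _⟩
    intro b hb
    rw [List.mem_singleton] at hb
    subst hb
    exact Or.inr hx

lemma pvE_pairwise (off : Int) (L : List (Int × Int × Int))
    (hL : L.Pairwise (fun a b => a.1 < b.1)) : (L.flatMap (pvEvs off)).Pairwise pvR := by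
  rw [List.pairwise_flatMap]
  refine ⟨fun a _ => pvEvs_pairwise off a, ?_⟩
  refine hL.imp_of_mem ?_
  intro a b _ _ hab q hq r hr
  left
  rw [pvEvs_snd off a q hq, pvEvs_snd off b r hr]
  exact hab

lemma pvRange_pairwise_lt (d : Int) : (PySem.List.pyRange 0 d 1).Pairwise (· < ·) := by
  rw [pvRange_eq, List.pairwise_map]
  exact List.pairwise_lt_range.imp (by intro a b h; exact_mod_cast h)

-- sorting the events groups them into position buckets, in mention-index order
lemma pvSortedE (off d : Int) (L : List (Int × Int × Int))
    (hL : L.Pairwise (fun a b => a.1 < b.1))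
    (hb : ∀ x ∈ L, 0 ≤ x.2.1 ∧ x.2.1 < d ∧ 0 ≤ x.2.2 ∧ x.2.2 < d) :
    PySem.List.sorted2 (L.flatMap (pvEvs off)) (fun e => e.1) (fun e => e.2.1)
      = (PySem.List.pyRange 0 d 1).flatMap
          (fun p => (L.flatMap (pvEvs off)).filter (fun q => decide (q.1 = p))) := by
  rw [pvSorted2_eq_lex]
  apply PySem.List.sorted_eq_of_perm_of_pairwise_lt
  · apply pvBuckets_perm _ ((pvRange_pairwise_lt d).imp (fun h => ne_of_lt h))
    intro q hq
    obtain ⟨x, hx, hqx⟩ := List.mem_flatMap.1 hq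
    have hbx := hb x hx
    rw [PySem.List.mem_pyRange_one]
    rcases pvEvs_fst off x q hqx with h | h <;> rw [h] <;> omega
  · rw [List.pairwise_flatMap]
    constructor
    · intro p _
      refine ((pvE_pairwise off L hL).filter _).imp_of_mem ?_
      intro a b ha hb hab
      have ha1 : a.1 = p := of_decide_eq_true (List.mem_filter.1 ha).2
      have hb1 : b.1 = p := of_decide_eq_true (List.mem_filter.1 hb).2
      rw [Prod.Lex.lt_iff]
      rcases hab with h | h
      · right; exact ⟨by simp [ha1, hb1], by simpa using h⟩
      · exact absurd (ha1.trans hb1.symm) h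
    · refine (pvRange_pairwise_lt d).imp_of_mem ?_
      intro p1 p2 _ _ h12 q hq r hr
      have hq1 : q.1 = p1 := of_decide_eq_true (List.mem_filter.1 hq).2
      have hr1 : r.1 = p2 := of_decide_eq_true (List.mem_filter.1 hr).2
      rw [Prod.Lex.lt_iff]
      left
      simp [hq1, hr1, h12]

-- B's while-loop peels exactly one bucket off the sorted stream
lemma pvCollect_split (p : Int) :
    ∀ (G rest : List (Int × Int × String)),
    (∀ x ∈ G, x.1 = p) → (∀ x ∈ rest, x.1 ≠ p) →
    bCollect p (G ++ rest) = (G.map (fun q => q.2.2), rest) := by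
  intro G
  induction G with
  | nil =>
    intro rest _ hrest
    cases rest with
    | nil => rfl
    | cons r t => simp [bCollect, hrest r (by simp)]
  | cons g G' ih =>
    intro rest hG hrest
    simp [bCollect, hG g (by simp), ih rest (fun x hx => hG x (by simp [hx])) hrest]

lemma pvScan (G : Int → List (Int × Int × String)) (hG : ∀ p, ∀ x ∈ G p, x.1 = p) :
    ∀ (ks : List Int), ks.Pairwise (· ≠ ·) → ∀ (acc : List String),
    ks.foldl (fun st p => ((st.1 ++ [PySem.Str.join "|" (bCollect p st.2).1]), (bCollect p st.2).2))
        (acc, ks.flatMap G)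
      = (acc ++ ks.map (fun p => PySem.Str.join "|" ((G p).map (fun q => q.2.2))), []) := by
  intro ks
  induction ks with
  | nil => intro _ acc; simp
  | cons p ks' ih =>
    intro hpw acc
    have hpw' := List.pairwise_cons.1 hpw
    have hsplit : bCollect p (G p ++ ks'.flatMap G) = ((G p).map (fun q => q.2.2), ks'.flatMap G) := by
      apply pvCollect_split p (G p) _ (hG p)
      intro x hx
      obtain ⟨p', hp', hxp'⟩ := List.mem_flatMap.1 hx
      rw [hG p' x hxp']
      exact Ne.symm (hpw'.1 p' hp')
    simp only [List.foldl_cons, List.flatMap_cons, hsplit]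
    rw [ih hpw'.2]
    simp [List.append_assoc]

lemma pvEvents_eq (off : Int) (L : List (Int × Int × Int)) :
    L.foldl (bEvStep off) [] = L.flatMap (pvEvs off) := by
  have h : bEvStep off = fun acc x => acc ++ pvEvs off x := by
    funext acc x
    unfold bEvStep pvEvs
    by_cases hx : x.2.1 = x.2.2 <;> simp [hx]
  rw [h, PySem.List.foldl_append_eq_flatMap]
  simp

lemma pvAlt_eq (nm : List (Int × Int)) (off d : Int) :
    create_additional_labels_alt nm off d
      = ((PySem.List.pyRange 0 d 1).foldl
          (fun st p => ((st.1 ++ [PySem.Str.join "|" (bCollect p st.2).1]), (bCollect p st.2).2))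
          (([] : List String),
            PySem.List.sorted2
              ((PySem.List.enumerate (PySem.List.sorted2 nm Prod.fst Prod.snd) 0).foldl (bEvStep off) [])
              (fun e => e.1) (fun e => e.2.1))).1 := rfl

-- ===== VERDICT (by name: the statement is the Claim_ definition above) =====
theorem create_additional_labels_spec : Claim_equal_create_additional_labels := by
  intro nm off d _ hpre
  unfold Spec_create_additional_labels create_additional_labels
  have hb : ∀ x ∈ PySem.List.enumerate (PySem.List.sorted2 nm Prod.fst Prod.snd) 0,
      0 ≤ x.2.1 ∧ x.2.1 < d ∧ 0 ≤ x.2.2 ∧ x.2.2 < d := by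
    intro x hx
    rw [PySem.List.mem_enumerate_iff] at hx
    obtain ⟨k, hk, rfl⟩ := hx
    dsimp only
    exact hpre _ ((PySem.List.sorted2_perm nm Prod.fst Prod.snd false).subset (List.getElem_mem hk))
  have hLpw := PySem.List.pairwise_lt_enumerate (PySem.List.sorted2 nm Prod.fst Prod.snd) 0
  have hinit : ((PySem.List.pyRange 0 d 1).map (fun _ => ("" : String)))
      = (((PySem.List.pyRange 0 d 1).map (fun _ => ([] : List String))).map pvJ) := by
    simp [pvJ_nil]
  rw [hinit,
    (pvFold_rel off _ ((PySem.List.pyRange 0 d 1).map (fun _ => ([] : List String))) (by simp)).1,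
    pvFragsFold off d _ _ hb,
    pvAlt_eq, pvEvents_eq off _, pvSortedE off d _ hLpw hb,
    pvScan (fun p => (((PySem.List.enumerate (PySem.List.sorted2 nm Prod.fst Prod.snd) 0).flatMap (pvEvs off)).filter (fun q => decide (q.1 = p))))
      (fun p x hx => of_decide_eq_true (List.mem_filter.1 hx).2)
      (PySem.List.pyRange 0 d 1) ((pvRange_pairwise_lt d).imp (fun h => ne_of_lt h)) []]
  simp [pvJ, List.map_map, Function.comp]
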